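-- pv_equiv track=rewrite | github.com/miliar/Code_Jam_Webscraper | solutions_python/Problem_55/837.py | roller
-- ===== SOURCE A (Python) =====
-- def roller(R, k, Queue):
--         Euros = 0
--         for i in range(R):
--                 count = 1
--                 while count<len(Queue):
--                         if sum(Queue[0:count+1])<=k:
--                                 count+=1
--                         else:
--                                 break
--                 Euros += sum(Queue[0:count])
--                 Queue = Queue[count:] + Queue[0:count]
--         return Euros
-- ===== SOURCE B (Python) =====
-- def roller(R, k, Queue):
--     n = len(Queue)
--     if n == 0:
--         return 0
--     # prefix sums of the doubled queue: P[i] = sum of first i elements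
--     P = [0]
--     for x in Queue + Queue:
--         P.append(P[-1] + x)
--     # for each start offset s: earnings of one round and next offset
--     earn = []
--     nxt = []
--     for s in range(n):
--         c = 1
--         while c < n and P[s + c + 1] - P[s] <= k:
--             c += 1
--         earn.append(P[s + c] - P[s])
--         nxt.append((s + c) % n)
--     total = 0
--     s = 0
--     for _ in range(R):
--         total += earn[s]
--         s = nxt[s]
--     return total
-- ===== Notes on version B (the rewrite author's own statement) =====
-- stated objective: faster
-- what changed: Instead of re-summing queue slices and rebuilding the queue list every round, B precomputes prefix sums of the doubled queue and a per-start-offset (earnings, next-offset) table once, then folds over the R rounds with O(1) table lookups per round.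
import Mathlib
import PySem

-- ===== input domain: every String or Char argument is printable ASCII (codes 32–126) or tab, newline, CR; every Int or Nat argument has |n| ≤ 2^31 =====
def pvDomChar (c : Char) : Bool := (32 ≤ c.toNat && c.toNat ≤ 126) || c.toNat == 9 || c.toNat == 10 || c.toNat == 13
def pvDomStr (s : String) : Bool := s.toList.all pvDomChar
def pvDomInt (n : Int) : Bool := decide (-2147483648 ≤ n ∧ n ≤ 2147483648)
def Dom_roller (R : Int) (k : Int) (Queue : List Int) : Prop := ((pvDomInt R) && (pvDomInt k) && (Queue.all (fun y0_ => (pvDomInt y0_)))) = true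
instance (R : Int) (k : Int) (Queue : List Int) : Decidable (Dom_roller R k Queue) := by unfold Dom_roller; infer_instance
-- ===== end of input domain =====

-- B replaces A's per-round re-summing of slices and list rotation by prefix sums over the
-- doubled queue, a once-built per-offset (earnings, next-offset) table, and an O(1)-per-round fold.

-- ===== PORT A =====
-- A's inner while loop: advance count while count < len(Queue) and sum(Queue[0:count+1]) <= k
def rollerCountA (k : Int) (Q : List Int) (count : Nat) : Nat :=
  if _h : count < Q.length then
    if (PySem.List.slice Q (some 0) (some ((count : Int) + 1))).sum ≤ k then
      rollerCountA k Q (count + 1)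
    else count
  else count
termination_by Q.length - count

def roller (R : Int) (k : Int) (Queue : List Int) : Int :=
  ((PySem.List.pyRange 0 R 1).foldl
    (fun st _ =>
      let count := rollerCountA k st.2 1
      (st.1 + (PySem.List.slice st.2 (some 0) (some (count : Int))).sum,
       PySem.List.slice st.2 (some (count : Int)) none ++
         PySem.List.slice st.2 (some 0) (some (count : Int))))
    (0, Queue)).1

-- ===== PORT B =====
-- running prefix sums: P.append(P[-1] + x) for x in the list (acc is the running P[-1])
def rollerPref (acc : Int) : List Int → List Int
  | [] => []
  | x :: xs => (acc + x) :: rollerPref (acc + x) xs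

-- B's count loop: while c < n and P[s+c+1] - P[s] <= k: c += 1
def rollerCountB (P : List Int) (k : Int) (n s c : Nat) : Nat :=
  if _h : c < n then
    if P.getD (s + c + 1) 0 - P.getD s 0 ≤ k then rollerCountB P k n s (c + 1) else c
  else c
termination_by n - c

def roller_alt (R : Int) (k : Int) (Queue : List Int) : Int :=
  let n := Queue.length
  if n = 0 then 0
  else
    let P := 0 :: rollerPref 0 (Queue ++ Queue)
    -- the (earn, nxt) table, one row per start offset s in range(n)
    let tab := (List.range n).map (fun s =>
      let c := rollerCountB P k n s 1
      (P.getD (s + c) 0 - P.getD s 0, (s + c) % n))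
    ((PySem.List.pyRange 0 R 1).foldl
      (fun st _ =>
        let row := tab.getD st.2 (0, 0)
        (st.1 + row.1, row.2))
      ((0 : Int), (0 : Nat))).1

-- ===== PRECONDITION & SPEC =====
def Spec_roller (R : Int) (k : Int) (Queue : List Int) (out : Int) : Prop := out = roller_alt R k Queue
instance (R : Int) (k : Int) (Queue : List Int) (out : Int) : Decidable (Spec_roller R k Queue out) := by unfold Spec_roller; infer_instance

-- ===== CLAIM (what is proved, stated in full; the proofs are below) =====
def Claim_equal_roller : Prop := ∀ (R : Int) (k : Int) (Queue : List Int), Dom_roller R k Queue → Spec_roller R k Queue (roller R k Queue)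

-- ===== LEMMAS AND PROOFS =====

theorem rollerPref_getD (xs : List Int) : ∀ (acc : Int) (j : Nat), j < xs.length →
    (rollerPref acc xs).getD j 0 = acc + (xs.take (j + 1)).sum := by
  induction xs with
  | nil => intro acc j h; simp at h
  | cons x xs ih =>
    intro acc j h
    cases j with
    | zero => simp [rollerPref]
    | succ j =>
      simp only [rollerPref, List.getD_cons_succ, List.take_succ_cons, List.sum_cons]
      rw [ih (acc + x) j (by simpa using h)]
      ring

theorem P_getD (D : List Int) (i : Nat) (hi : i ≤ D.length) :
    ((0 : Int) :: rollerPref 0 D).getD i 0 = (D.take i).sum := by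
  cases i with
  | zero => simp
  | succ i =>
    simp only [List.getD_cons_succ]
    rw [rollerPref_getD D 0 i (by omega)]
    ring

theorem sum_drop_take (D : List Int) (s m : Nat) :
    ((D.take (s + m)).sum) - ((D.take s).sum) = ((D.drop s).take m).sum := by
  rw [List.take_add, List.sum_append]; ring

theorem rotate_take (Q : List Int) (s m : Nat) (hs : s < Q.length) (hm : m ≤ Q.length) :
    (Q.rotate s).take m = ((Q ++ Q).drop s).take m := by
  rw [List.rotate_eq_drop_append_take (le_of_lt hs), List.drop_append_of_le_length (le_of_lt hs)]
  rw [List.take_append, List.take_append]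
  congr 1
  rw [List.take_take]
  congr 1
  have : (Q.drop s).length = Q.length - s := by simp
  omega

-- sum of a rotated queue's first m items, read off the doubled-queue prefix sums
theorem slice_sum_eq (Q : List Int) (s m : Nat) (hs : s < Q.length) (hm : m ≤ Q.length) :
    (PySem.List.slice (Q.rotate s) (some 0) (some (m : Int))).sum =
      ((0 : Int) :: rollerPref 0 (Q ++ Q)).getD (s + m) 0 -
        ((0 : Int) :: rollerPref 0 (Q ++ Q)).getD s 0 := by
  rw [PySem.List.slice_zero_start, PySem.List.slice_to_natCast]
  rw [P_getD (Q ++ Q) (s + m) (by simp; omega), P_getD (Q ++ Q) s (by simp; omega)]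
  rw [sum_drop_take, rotate_take Q s m hs hm]

theorem countB_le (P : List Int) (k : Int) (n s : Nat) :
    ∀ d c, n - c ≤ d → c ≤ n → rollerCountB P k n s c ≤ n := by
  intro d
  induction d with
  | zero =>
    intro c hd hc
    rw [rollerCountB]
    have : ¬ c < n := by omega
    simp [this]; omega
  | succ d ih =>
    intro c hd hc
    rw [rollerCountB]
    split_ifs with h1 h2
    · exact ih (c + 1) (by omega) (by omega)
    · omega
    · omega

theorem counts_eq (Q : List Int) (k : Int) (s : Nat) (hs : s < Q.length) :
    ∀ d c, Q.length - c ≤ d →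
      rollerCountA k (Q.rotate s) c =
        rollerCountB ((0 : Int) :: rollerPref 0 (Q ++ Q)) k Q.length s c := by
  intro d
  induction d with
  | zero =>
    intro c hd
    rw [rollerCountA, rollerCountB]
    have : ¬ c < Q.length := by omega
    simp [List.length_rotate, this]
  | succ d ih =>
    intro c hd
    rw [rollerCountA, rollerCountB]
    simp only [List.length_rotate]
    by_cases h1 : c < Q.length
    · have hsum : (PySem.List.slice (Q.rotate s) (some 0) (some ((c : Int) + 1))).sum =
          ((0 : Int) :: rollerPref 0 (Q ++ Q)).getD (s + c + 1) 0 -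
            ((0 : Int) :: rollerPref 0 (Q ++ Q)).getD s 0 := by
        have := slice_sum_eq Q s (c + 1) hs (by omega)
        rw [show ((c : Int) + 1) = ((c + 1 : Nat) : Int) by push_cast; ring]
        rw [this]; ring_nf
      simp only [h1, dif_pos]
      rw [hsum]
      split_ifs with h2
      · exact ih (c + 1) (by omega)
      · rfl
    · simp [h1]

-- one round of A from a rotated queue equals one table row of B
theorem step_eq (Q : List Int) (k : Int) (hn : 0 < Q.length) (E : Int) (s : Nat) (hs : s < Q.length) :
    (let count := rollerCountA k (Q.rotate s) 1
     ((E + (PySem.List.slice (Q.rotate s) (some 0) (some (count : Int))).sum,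
       PySem.List.slice (Q.rotate s) (some (count : Int)) none ++
         PySem.List.slice (Q.rotate s) (some 0) (some (count : Int))) : Int × List Int)) =
      (E + (((List.range Q.length).map (fun s =>
          let c := rollerCountB ((0 : Int) :: rollerPref 0 (Q ++ Q)) k Q.length s 1
          (((0 : Int) :: rollerPref 0 (Q ++ Q)).getD (s + c) 0 -
            ((0 : Int) :: rollerPref 0 (Q ++ Q)).getD s 0, (s + c) % Q.length))).getD s (0, 0)).1,
       Q.rotate ((((List.range Q.length).map (fun s =>
          let c := rollerCountB ((0 : Int) :: rollerPref 0 (Q ++ Q)) k Q.length s 1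
          (((0 : Int) :: rollerPref 0 (Q ++ Q)).getD (s + c) 0 -
            ((0 : Int) :: rollerPref 0 (Q ++ Q)).getD s 0, (s + c) % Q.length))).getD s (0, 0)).2)) := by
  have htab : (((List.range Q.length).map (fun s =>
        let c := rollerCountB ((0 : Int) :: rollerPref 0 (Q ++ Q)) k Q.length s 1
        (((0 : Int) :: rollerPref 0 (Q ++ Q)).getD (s + c) 0 -
          ((0 : Int) :: rollerPref 0 (Q ++ Q)).getD s 0, (s + c) % Q.length))).getD s (0, 0)) =
      (let c := rollerCountB ((0 : Int) :: rollerPref 0 (Q ++ Q)) k Q.length s 1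
       (((0 : Int) :: rollerPref 0 (Q ++ Q)).getD (s + c) 0 -
         ((0 : Int) :: rollerPref 0 (Q ++ Q)).getD s 0, (s + c) % Q.length)) := by
    simp [List.getD_eq_getElem?_getD, List.getElem?_range hs]
  rw [htab]
  have hc : rollerCountA k (Q.rotate s) 1 =
      rollerCountB ((0 : Int) :: rollerPref 0 (Q ++ Q)) k Q.length s 1 :=
    counts_eq Q k s hs (Q.length - 1) 1 (by omega)
  set c := rollerCountB ((0 : Int) :: rollerPref 0 (Q ++ Q)) k Q.length s 1 with hcdef
  have hcle : c ≤ Q.length := countB_le _ k Q.length s (Q.length - 1) 1 (by omega) hn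
  simp only [hc]
  simp only [Prod.mk.injEq]
  refine ⟨?_, ?_⟩
  · -- earnings component
    rw [slice_sum_eq Q s c hs hcle]
  · -- queue component
    rw [PySem.List.slice_zero_start, PySem.List.slice_to_natCast, PySem.List.slice_from_natCast]
    rw [← List.rotate_eq_drop_append_take (by simpa using hcle), List.rotate_rotate]
    exact (List.rotate_mod Q (s + c)).symm

theorem main_fold (Q : List Int) (k : Int) (hn : 0 < Q.length) :
    ∀ (l : List Int) (E : Int) (s : Nat), s < Q.length →
      (l.foldl (fun (st : Int × List Int) _ =>
          let count := rollerCountA k st.2 1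
          (st.1 + (PySem.List.slice st.2 (some 0) (some (count : Int))).sum,
           PySem.List.slice st.2 (some (count : Int)) none ++
             PySem.List.slice st.2 (some 0) (some (count : Int)))) (E, Q.rotate s)).1 =
        (l.foldl (fun (st : Int × Nat) _ =>
          let row := ((List.range Q.length).map (fun s =>
            let c := rollerCountB ((0 : Int) :: rollerPref 0 (Q ++ Q)) k Q.length s 1
            (((0 : Int) :: rollerPref 0 (Q ++ Q)).getD (s + c) 0 -
              ((0 : Int) :: rollerPref 0 (Q ++ Q)).getD s 0, (s + c) % Q.length))).getD st.2 (0, 0)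
          (st.1 + row.1, row.2)) (E, s)).1 := by
  intro l
  induction l with
  | nil => intro E s hs; rfl
  | cons a l ih =>
    intro E s hs
    simp only [List.foldl_cons]
    have hstep := step_eq Q k hn E s hs
    simp only at hstep
    rw [hstep]
    have hrow : (((List.range Q.length).map (fun s =>
        let c := rollerCountB ((0 : Int) :: rollerPref 0 (Q ++ Q)) k Q.length s 1
        (((0 : Int) :: rollerPref 0 (Q ++ Q)).getD (s + c) 0 -
          ((0 : Int) :: rollerPref 0 (Q ++ Q)).getD s 0, (s + c) % Q.length))).getD s (0, 0)).2 <
        Q.length := by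
      simp [List.getD_eq_getElem?_getD, List.getElem?_range hs]
      exact Nat.mod_lt _ hn
    exact ih _ _ hrow

theorem roller_nil (R k : Int) (E : Int) :
    ((PySem.List.pyRange 0 R 1).foldl (fun (st : Int × List Int) _ =>
      let count := rollerCountA k st.2 1
      (st.1 + (PySem.List.slice st.2 (some 0) (some (count : Int))).sum,
       PySem.List.slice st.2 (some (count : Int)) none ++
         PySem.List.slice st.2 (some 0) (some (count : Int)))) (E, ([] : List Int))) = (E, []) := by
  induction (PySem.List.pyRange 0 R 1) generalizing E with
  | nil => rfl
  | cons a l ih =>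
    simp only [List.foldl_cons]
    convert ih E using 2 <;> simp [PySem.List.slice]

-- ===== VERDICT (by name: the statement is the Claim_ definition above) =====
theorem roller_spec : Claim_equal_roller := by
  intro R k Queue _dom
  unfold Spec_roller roller roller_alt
  by_cases hn : Queue.length = 0
  · have : Queue = [] := List.length_eq_zero_iff.mp hn
    subst this
    rw [roller_nil R k 0]
    simp
  · rw [if_neg hn]
    have h0 : Queue.rotate 0 = Queue := List.rotate_zero Queue
    have := main_fold Queue k (by omega) (PySem.List.pyRange 0 R 1) 0 0 (by omega)
    rw [h0] at this
    exact this
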